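-- pv_equiv track=rewrite | github.com/kirylzhautouski/bsu | algorithms/ds-task27.2/program.py | find_antibase
-- ===== SOURCE A (Python) =====
-- def find_antibase(start, number_of_incomings, number_of_outcomings, scc_connections, number_of_components, labels):
--     antibase = 0
--
--     if labels[start] == False:
--         if number_of_outcomings[start] == 0 and number_of_incomings[start] != 0: # if start is antibase
--             antibase = start
--             labels[start] = True
--             return antibase
--
--         labels[start] = True
--         for i in range(number_of_components):
--             if scc_connections[start][i]:
--                 antibase_i = find_antibase(i, number_of_incomings, number_of_outcomings, scc_connections, number_of_components, labels)
--
--                 antibase = antibase_i if antibase == 0 else antibase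
--
--     return antibase
-- ===== SOURCE B (Python) =====
-- def find_antibase(start, number_of_incomings, number_of_outcomings, scc_connections, number_of_components, labels):
--     antibase = 0
--     stack = [start]
--     while stack:
--         node = stack.pop()
--         if labels[node]:
--             continue
--         if number_of_outcomings[node] == 0 and number_of_incomings[node] != 0:  # antibase node
--             labels[node] = True
--             if antibase == 0:
--                 antibase = node
--             continue
--         labels[node] = True
--         for i in reversed(range(number_of_components)):
--             if scc_connections[node][i]:
--                 stack.append(i)
--     return antibase
-- ===== Notes on version B (the rewrite author's own statement) =====
-- stated objective: alternative
-- what changed: A's recursive DFS (recursion on each child, first non-zero child result kept) is replaced by an iterative DFS with an explicit stack: nodes are marked when popped, children are pushed in reverse index order so they pop in ascending order, and the first antibase popped is recorded; same asymptotic cost.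
-- outside the precondition, e.g. on find_antibase(0, [0, 0], [1, 1], [[True, True], []], 2, [False, True]): A returns 0, B returns 0; on find_antibase(0, [], [1], [[False]], 1, [False]): A returns 0, B returns 0
import Mathlib
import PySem

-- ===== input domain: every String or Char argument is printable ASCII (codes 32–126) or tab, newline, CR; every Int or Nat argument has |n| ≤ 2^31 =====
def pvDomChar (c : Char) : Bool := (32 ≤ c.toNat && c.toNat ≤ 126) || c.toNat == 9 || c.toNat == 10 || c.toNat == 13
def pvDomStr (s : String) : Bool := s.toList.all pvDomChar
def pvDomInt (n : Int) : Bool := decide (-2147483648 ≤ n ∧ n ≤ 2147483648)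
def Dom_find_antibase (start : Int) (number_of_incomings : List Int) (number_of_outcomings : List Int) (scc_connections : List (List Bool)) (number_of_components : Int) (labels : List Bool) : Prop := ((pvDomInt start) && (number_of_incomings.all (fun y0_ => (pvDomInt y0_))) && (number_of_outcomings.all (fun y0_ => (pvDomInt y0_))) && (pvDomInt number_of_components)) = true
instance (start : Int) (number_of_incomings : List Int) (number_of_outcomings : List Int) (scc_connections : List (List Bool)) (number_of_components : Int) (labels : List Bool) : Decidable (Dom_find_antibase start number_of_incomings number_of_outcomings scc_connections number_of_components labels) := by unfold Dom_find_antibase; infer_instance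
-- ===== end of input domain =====

-- B replaces A's recursive DFS by an iterative DFS over an explicit stack (different decomposition, same cost).
-- Both Pythons mutate `labels` identically (checked by fuzzing); the equivalence proved here is about the return value.

-- ===== PORT A =====

-- truthiness of scc_connections[node][i]; `none` (IndexError in Python) is outside Pre_ and read as "no edge"
def pvEdge (scc_connections : List (List Bool)) (node i : Int) : Bool :=
  ((PySem.List.pyGet? scc_connections node).bind (fun row => PySem.List.pyGet? row i)) == some true

-- A's recursive DFS; `labels` is threaded as explicit state (Python mutates it in place).
-- Fuel: every recursive call first flips one `false` label to `true`, so `labels.length + 1` at the top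
-- is never exhausted.  Where Python raises IndexError the port returns (0, labels); those inputs are
-- outside Pre_ (Python also short-circuits `and`, so it may skip the incomings lookup; inside Pre_
-- both lookups are in range, where evaluating both is exact).
def pvARec (number_of_incomings number_of_outcomings : List Int)
    (scc_connections : List (List Bool)) (number_of_components : Int) :
    Nat → Int → List Bool → Int × List Bool
  | 0, _, labels => (0, labels)
  | fuel+1, start, labels =>
    match PySem.List.pyGet? labels start with
    | none => (0, labels)                -- IndexError: outside Pre_
    | some true => (0, labels)           -- already labeled: antibase stays 0
    | some false =>
      match PySem.List.pyGet? number_of_outcomings start with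
      | none => (0, labels)              -- IndexError: outside Pre_
      | some o =>
        match PySem.List.pyGet? number_of_incomings start with
        | none => (0, labels)            -- IndexError: outside Pre_
        | some ic =>
          if o = 0 ∧ ic ≠ 0 then         -- start is an antibase
            (start, PySem.List.pySetD labels start true)
          else
            (PySem.List.pyRange 0 number_of_components 1).foldl
              (fun s i =>
                if pvEdge scc_connections start i then
                  let r := pvARec number_of_incomings number_of_outcomings scc_connections
                             number_of_components fuel i s.2
                  (if s.1 = 0 then r.1 else s.1, r.2)
                else s)
              (0, PySem.List.pySetD labels start true)

def find_antibase (start : Int) (number_of_incomings : List Int) (number_of_outcomings : List Int) (scc_connections : List (List Bool)) (number_of_components : Int) (labels : List Bool) : Int :=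
  (pvARec number_of_incomings number_of_outcomings scc_connections number_of_components
    (labels.length + 1) start labels).1

-- ===== PORT B =====

def pvCountFalse (labels : List Bool) : Nat := labels.count false

-- termination helpers for the stack loop (cited by `decreasing_by` below)
theorem pvIdx_lt {n : Nat} {i : Int} {k : Nat} (h : PySem.List.pyIdx? n i = some k) : k < n := by
  unfold PySem.List.pyIdx? at h
  split at h <;> split at h <;> simp_all <;> omega

theorem pvSetD_eq {L : List Bool} {i : Int} {x : Bool}
    (h : PySem.List.pyGet? L i = some x) :
    ∃ j, ∃ hj : j < L.length, L[j] = x ∧ ∀ v, PySem.List.pySetD L i v = L.set j v := by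
  unfold PySem.List.pyGet? at h
  cases hk : PySem.List.pyIdx? L.length i with
  | none => rw [hk] at h; simp at h
  | some k =>
    rw [hk] at h
    simp only [Option.bind_some] at h
    have hlt : k < L.length := pvIdx_lt hk
    refine ⟨k, hlt, ?_, ?_⟩
    · have := h; simp [List.getElem?_eq_getElem hlt] at this; exact this.symm ▸ rfl
    · intro v
      unfold PySem.List.pySetD PySem.List.pySet?
      rw [hk]; rfl

theorem pvCF_set_lt {L : List Bool} {i : Int}
    (h : PySem.List.pyGet? L i = some false) :
    pvCountFalse (PySem.List.pySetD L i true) < pvCountFalse L := by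
  obtain ⟨j, hj, hget, hset⟩ := pvSetD_eq h
  unfold pvCountFalse
  rw [hset true, List.count_set hj, hget]
  simp
  exact hget ▸ List.getElem_mem hj

-- B's iterative DFS: stack head = top (Python's list end); children are pushed in descending
-- index order so they pop in ascending order.  `none` branches (IndexError in Python) skip the
-- node; those inputs are outside Pre_.
def pvBLoop (number_of_incomings number_of_outcomings : List Int)
    (scc_connections : List (List Bool)) (number_of_components : Int)
    (labels : List Bool) (stack : List Int) (antibase : Int) : Int :=
  match stack with
  | [] => antibase
  | node :: rest =>
    match h : PySem.List.pyGet? labels node with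
    | none =>
      pvBLoop number_of_incomings number_of_outcomings scc_connections number_of_components
        labels rest antibase
    | some true =>
      pvBLoop number_of_incomings number_of_outcomings scc_connections number_of_components
        labels rest antibase
    | some false =>
      match PySem.List.pyGet? number_of_outcomings node with
      | none =>
        pvBLoop number_of_incomings number_of_outcomings scc_connections number_of_components
          labels rest antibase
      | some o =>
        match PySem.List.pyGet? number_of_incomings node with
        | none =>
          pvBLoop number_of_incomings number_of_outcomings scc_connections number_of_components
            labels rest antibase
        | some ic =>
          if o = 0 ∧ ic ≠ 0 then
            pvBLoop number_of_incomings number_of_outcomings scc_connections number_of_components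
              (PySem.List.pySetD labels node true) rest
              (if antibase = 0 then node else antibase)
          else
            pvBLoop number_of_incomings number_of_outcomings scc_connections number_of_components
              (PySem.List.pySetD labels node true)
              ((PySem.List.pyRange 0 number_of_components 1).reverse.foldl
                (fun s i => if pvEdge scc_connections node i then i :: s else s) rest)
              antibase
  termination_by (pvCountFalse labels, stack.length)
  decreasing_by
  all_goals first
    | exact Prod.Lex.left _ _ (pvCF_set_lt h)
    | exact Prod.Lex.right _ (by simp)

def find_antibase_alt (start : Int) (number_of_incomings : List Int) (number_of_outcomings : List Int) (scc_connections : List (List Bool)) (number_of_components : Int) (labels : List Bool) : Int :=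
  pvBLoop number_of_incomings number_of_outcomings scc_connections number_of_components
    labels [start] 0

-- ===== PRECONDITION & SPEC =====
-- Pre_: a closed-form sufficient condition for Python A to return without an IndexError: start is in
-- range for labels and then either (a) start is already labeled (immediate return 0), or (b) start is
-- an antibase (out-degree 0, in-degree nonzero: immediate return start), or (c) every index below
-- number_of_components is in range for all four lists, so the whole traversal is safe.  This is
-- narrower than A's exact domain: A can also return when an out-of-range entry is never visited
-- (reachability) or skipped by `and` short-circuiting; that is not closed-form, so such inputs are excluded.
def Pre_find_antibase (start : Int) (number_of_incomings : List Int) (number_of_outcomings : List Int) (scc_connections : List (List Bool)) (number_of_components : Int) (labels : List Bool) : Prop :=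
  PySem.Raise.InRange labels.length start ∧
  (PySem.List.pyGetD labels start false = true ∨
    (PySem.Raise.InRange number_of_outcomings.length start ∧
     PySem.Raise.InRange number_of_incomings.length start ∧
     ((PySem.List.pyGetD number_of_outcomings start 0 = 0 ∧
       PySem.List.pyGetD number_of_incomings start 0 ≠ 0) ∨
      (PySem.Raise.InRange scc_connections.length start ∧
       number_of_components ≤ (labels.length : Int) ∧
       number_of_components ≤ (number_of_incomings.length : Int) ∧
       number_of_components ≤ (number_of_outcomings.length : Int) ∧
       number_of_components ≤ (scc_connections.length : Int) ∧
       ∀ row ∈ scc_connections, number_of_components ≤ (row.length : Int)))))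
instance (start : Int) (number_of_incomings : List Int) (number_of_outcomings : List Int) (scc_connections : List (List Bool)) (number_of_components : Int) (labels : List Bool) : Decidable (Pre_find_antibase start number_of_incomings number_of_outcomings scc_connections number_of_components labels) := by unfold Pre_find_antibase; infer_instance

def pvWitness_find_antibase : Int × List Int × List Int × List (List Bool) × Int × List Bool :=
  (0, [1, 0], [0, 1], [[false, false], [true, false]], 2, [false, false])

def Spec_find_antibase (start : Int) (number_of_incomings : List Int) (number_of_outcomings : List Int) (scc_connections : List (List Bool)) (number_of_components : Int) (labels : List Bool) (out : Int) : Prop := out = find_antibase_alt start number_of_incomings number_of_outcomings scc_connections number_of_components labels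
instance (start : Int) (number_of_incomings : List Int) (number_of_outcomings : List Int) (scc_connections : List (List Bool)) (number_of_components : Int) (labels : List Bool) (out : Int) : Decidable (Spec_find_antibase start number_of_incomings number_of_outcomings scc_connections number_of_components labels out) := by unfold Spec_find_antibase; infer_instance

-- ===== CLAIM (what is proved, stated in full; the proofs are below) =====
def Claim_equal_find_antibase : Prop := ∀ (start : Int) (number_of_incomings : List Int) (number_of_outcomings : List Int) (scc_connections : List (List Bool)) (number_of_components : Int) (labels : List Bool), Dom_find_antibase start number_of_incomings number_of_outcomings scc_connections number_of_components labels → Pre_find_antibase start number_of_incomings number_of_outcomings scc_connections number_of_components labels → Spec_find_antibase start number_of_incomings number_of_outcomings scc_connections number_of_components labels (find_antibase start number_of_incomings number_of_outcomings scc_connections number_of_components labels)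

-- ===== LEMMAS AND PROOFS =====
-- The two ports in fact agree on EVERY input (both read a would-be IndexError as a no-op), so the
-- equivalence is proved unconditionally and specialised to Pre_ at the end.

-- one step of the "fold A's recursion over a list of nodes" view of B's stack
def pvStep (number_of_incomings number_of_outcomings : List Int)
    (scc_connections : List (List Bool)) (number_of_components : Int) (f : Nat)
    (s : Int × List Bool) (i : Int) : Int × List Bool :=
  let r := pvARec number_of_incomings number_of_outcomings scc_connections number_of_components f i s.2
  (if s.1 = 0 then r.1 else s.1, r.2)

theorem pvCF_set_le (L : List Bool) (i : Int) :
    pvCountFalse (PySem.List.pySetD L i true) ≤ pvCountFalse L := by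
  unfold pvCountFalse PySem.List.pySetD PySem.List.pySet?
  cases hk : PySem.List.pyIdx? L.length i with
  | none => simp
  | some k =>
    simp only [Option.map_some, Option.getD_some]
    rw [List.count_set (pvIdx_lt hk)]
    split <;> simp

theorem pvFoldl_cf_mono {g : (Int × List Bool) → Int → (Int × List Bool)}
    (hg : ∀ s i, pvCountFalse (g s i).2 ≤ pvCountFalse s.2) :
    ∀ (l : List Int) (s : Int × List Bool), pvCountFalse ((l.foldl g s).2) ≤ pvCountFalse s.2 := by
  intro l
  induction l with
  | nil => intro s; simp
  | cons i l ih =>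
    intro s
    calc pvCountFalse ((List.foldl g (g s i) l).2) ≤ pvCountFalse (g s i).2 := ih _
      _ ≤ pvCountFalse s.2 := hg s i

theorem pvARec_cf (inc out : List Int) (scc : List (List Bool)) (nc : Int) :
    ∀ (f : Nat) (n : Int) (L : List Bool),
      pvCountFalse (pvARec inc out scc nc f n L).2 ≤ pvCountFalse L := by
  intro f
  induction f with
  | zero => intro n L; simp [pvARec]
  | succ f ih =>
    intro n L
    simp only [pvARec]
    split
    · simp
    · simp
    · split
      · simp
      · split
        · simp
        · split
          · exact pvCF_set_le L n
          · refine le_trans (pvFoldl_cf_mono ?_ _ _) (pvCF_set_le L n)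
            intro s i
            split
            · exact ih _ _
            · exact le_refl _

theorem pvARec_irr (inc out : List Int) (scc : List (List Bool)) (nc : Int) :
    ∀ (c : Nat) (L : List Bool), pvCountFalse L ≤ c → ∀ (n : Int) (f g : Nat),
      pvCountFalse L < f → pvCountFalse L < g →
      pvARec inc out scc nc f n L = pvARec inc out scc nc g n L := by
  intro c
  induction c using Nat.strong_induction_on with
  | _ c IHc =>
    intro L hc n f g hf hg
    cases f with
    | zero => exact absurd hf (Nat.not_lt_zero _)
    | succ f' =>
      cases g with
      | zero => exact absurd hg (Nat.not_lt_zero _)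
      | succ g' =>
        simp only [pvARec]
        cases hL : PySem.List.pyGet? L n with
        | none => rfl
        | some b =>
          cases b with
          | true => rfl
          | false =>
            cases ho : PySem.List.pyGet? out n with
            | none => rfl
            | some o =>
              cases hi : PySem.List.pyGet? inc n with
              | none => rfl
              | some ic =>
                by_cases hab : o = 0 ∧ ic ≠ 0
                · simp [hab]
                · simp only [if_neg hab]
                  have hcfL : pvCountFalse (PySem.List.pySetD L n true) < pvCountFalse L :=
                    pvCF_set_lt hL
                  have haux : ∀ (l : List Int) (s : Int × List Bool),
                      pvCountFalse s.2 < pvCountFalse L →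
                      l.foldl (fun s i =>
                        if pvEdge scc n i then
                          let r := pvARec inc out scc nc f' i s.2
                          (if s.1 = 0 then r.1 else s.1, r.2)
                        else s) s
                      = l.foldl (fun s i =>
                        if pvEdge scc n i then
                          let r := pvARec inc out scc nc g' i s.2
                          (if s.1 = 0 then r.1 else s.1, r.2)
                        else s) s := by
                    intro l
                    induction l with
                    | nil => intro s _; rfl
                    | cons i l ihl =>
                      intro s hs
                      simp only [List.foldl_cons]
                      by_cases he : pvEdge scc n i
                      · have harec : pvARec inc out scc nc f' i s.2 = pvARec inc out scc nc g' i s.2 := by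
                          refine IHc (pvCountFalse s.2) (by omega) s.2 le_rfl i f' g' (by omega) (by omega)
                        simp only [he, if_pos]
                        rw [harec]
                        exact ihl _ (lt_of_le_of_lt (pvARec_cf inc out scc nc g' i s.2) hs)
                      · simp only [he]
                        exact ihl s hs
                  exact haux _ (0, PySem.List.pySetD L n true) hcfL

theorem pvFoldl_step_irr (inc out : List Int) (scc : List (List Bool)) (nc : Int)
    (l : List Int) : ∀ (s : Int × List Bool) (f g : Nat),
    pvCountFalse s.2 < f → pvCountFalse s.2 < g →
    l.foldl (pvStep inc out scc nc f) s = l.foldl (pvStep inc out scc nc g) s := by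
  induction l with
  | nil => intro s f g _ _; rfl
  | cons i l ihl =>
    intro s f g hf hg
    simp only [List.foldl_cons]
    have harec : pvARec inc out scc nc f i s.2 = pvARec inc out scc nc g i s.2 :=
      pvARec_irr inc out scc nc (pvCountFalse s.2) s.2 le_rfl i f g hf hg
    have hstep : pvStep inc out scc nc f s i = pvStep inc out scc nc g s i := by
      unfold pvStep; rw [harec]
    rw [hstep]
    refine ihl _ f g ?_ ?_ <;>
      exact lt_of_le_of_lt (by unfold pvStep; exact pvARec_cf inc out scc nc g i s.2) ‹_›

theorem pvRevPush (q : Int → Bool) (l : List Int) (rest : List Int) :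
    l.reverse.foldl (fun s i => if q i then i :: s else s) rest
      = l.filter q ++ rest := by
  rw [List.foldl_reverse]
  induction l with
  | nil => rfl
  | cons x l ihl =>
    simp only [List.foldr_cons, ihl, List.filter_cons]
    by_cases hx : q x <;> simp [hx]

theorem pvShift (inc out : List Int) (scc : List (List Bool)) (nc : Int) (f : Nat)
    (cs : List Int) : ∀ (a : Int) (L : List Bool),
    cs.foldl (pvStep inc out scc nc f) (a, L)
      = ((if a = 0 then (cs.foldl (pvStep inc out scc nc f) (0, L)).1 else a),
         (cs.foldl (pvStep inc out scc nc f) (0, L)).2) := by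
  induction cs with
  | nil =>
    intro a L
    simp only [List.foldl_nil]
    by_cases ha : a = 0 <;> simp [ha]
  | cons c cs ihl =>
    intro a L
    simp only [List.foldl_cons]
    by_cases ha : a = 0
    · subst ha
      simp [pvStep]
    · have h1 : pvStep inc out scc nc f (a, L) c
          = (a, (pvARec inc out scc nc f c L).2) := by
        simp [pvStep, ha]
      have h2 : pvStep inc out scc nc f (0, L) c
          = ((pvARec inc out scc nc f c L).1, (pvARec inc out scc nc f c L).2) := by
        simp [pvStep]
      rw [h1, h2, ihl a, ihl ((pvARec inc out scc nc f c L).1)]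
      by_cases hr : (pvARec inc out scc nc f c L).1 = 0 <;> simp [ha, hr]

theorem pvKey (inc out : List Int) (scc : List (List Bool)) (nc : Int) :
    ∀ (M : Nat) (L : List Bool) (stack : List Int) (a : Int) (f : Nat),
      (nc.toNat + 1) * pvCountFalse L + stack.length ≤ M → pvCountFalse L < f →
      pvBLoop inc out scc nc L stack a
        = (stack.foldl (pvStep inc out scc nc f) (a, L)).1 := by
  intro M
  induction M using Nat.strong_induction_on with
  | _ M IH =>
    intro L stack a f hM hf
    cases stack with
    | nil => simp [pvBLoop]
    | cons node rest =>
      cases f with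
      | zero => exact absurd hf (Nat.not_lt_zero _)
      | succ f' =>
        simp only [List.length_cons] at hM
        rw [List.foldl_cons]
        simp only [pvBLoop, pvStep, pvARec]
        cases hL : PySem.List.pyGet? L node with
        | none =>
          have ha : (if a = 0 then (0 : Int) else a) = a := by split <;> simp_all
          rw [ha]
          exact IH _ (by omega) L rest a (f'+1) le_rfl hf
        | some b =>
          cases b with
          | true =>
            have ha : (if a = 0 then (0 : Int) else a) = a := by split <;> simp_all
            rw [ha]
            exact IH _ (by omega) L rest a (f'+1) le_rfl hf
          | false =>
            cases ho : PySem.List.pyGet? out node with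
            | none =>
              have ha : (if a = 0 then (0 : Int) else a) = a := by split <;> simp_all
              rw [ha]
              exact IH _ (by omega) L rest a (f'+1) le_rfl hf
            | some o =>
              cases hi : PySem.List.pyGet? inc node with
              | none =>
                have ha : (if a = 0 then (0 : Int) else a) = a := by split <;> simp_all
                rw [ha]
                exact IH _ (by omega) L rest a (f'+1) le_rfl hf
              | some ic =>
                by_cases hab : o = 0 ∧ ic ≠ 0
                · -- antibase node
                  simp only [if_pos hab]
                  have hcf1 : pvCountFalse (PySem.List.pySetD L node true) < pvCountFalse L :=
                    pvCF_set_lt hL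
                  have hmul := Nat.mul_le_mul_left (nc.toNat+1) (show pvCountFalse (PySem.List.pySetD L node true) + 1 ≤ pvCountFalse L from hcf1)
                  have hdist : (nc.toNat+1) * (pvCountFalse (PySem.List.pySetD L node true) + 1)
                      = (nc.toNat+1) * pvCountFalse (PySem.List.pySetD L node true) + (nc.toNat+1) := by ring
                  exact IH _ (by omega) _ rest _ (f'+1) le_rfl (by omega)
                · -- ordinary node: push all children, in reverse order
                  simp only [if_neg hab]
                  rw [pvRevPush]
                  have hcf1 : pvCountFalse (PySem.List.pySetD L node true) < pvCountFalse L :=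
                    pvCF_set_lt hL
                  have hlen : ((PySem.List.pyRange 0 nc 1).filter (pvEdge scc node)).length ≤ nc.toNat := by
                    have h1 := List.length_filter_le (pvEdge scc node) (PySem.List.pyRange 0 nc 1)
                    have h2 : (PySem.List.pyRange 0 nc 1).length = nc.toNat := by
                      rw [PySem.List.length_pyRange_one]; simp
                    omega
                  have hmul := Nat.mul_le_mul_left (nc.toNat+1) (show pvCountFalse (PySem.List.pySetD L node true) + 1 ≤ pvCountFalse L from hcf1)
                  have hdist : (nc.toNat+1) * (pvCountFalse (PySem.List.pySetD L node true) + 1)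
                      = (nc.toNat+1) * pvCountFalse (PySem.List.pySetD L node true) + (nc.toNat+1) := by ring
                  have hrec := IH ((nc.toNat+1) * pvCountFalse (PySem.List.pySetD L node true)
                      + (((PySem.List.pyRange 0 nc 1).filter (pvEdge scc node)) ++ rest).length)
                    (by simp only [List.length_append]; omega)
                    (PySem.List.pySetD L node true)
                    (((PySem.List.pyRange 0 nc 1).filter (pvEdge scc node)) ++ rest) a f'
                    le_rfl (by omega)
                  rw [hrec, List.foldl_append,
                      pvShift inc out scc nc f' ((PySem.List.pyRange 0 nc 1).filter (pvEdge scc node)) a (PySem.List.pySetD L node true)]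
                  have hA : (PySem.List.pyRange 0 nc 1).foldl
                      (fun s i =>
                        if pvEdge scc node i then
                          let r := pvARec inc out scc nc f' i s.2
                          (if s.1 = 0 then r.1 else s.1, r.2)
                        else s) (0, PySem.List.pySetD L node true)
                      = ((PySem.List.pyRange 0 nc 1).filter (pvEdge scc node)).foldl
                          (pvStep inc out scc nc f') (0, PySem.List.pySetD L node true) := by
                    rw [show (fun (s : Int × List Bool) (i : Int) =>
                          if pvEdge scc node i then
                            let r := pvARec inc out scc nc f' i s.2
                            (if s.1 = 0 then r.1 else s.1, r.2)
                          else s)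
                        = (fun (s : Int × List Bool) (i : Int) =>
                            if pvEdge scc node i then pvStep inc out scc nc f' s i else s) from rfl]
                    rw [PySem.List.foldl_ite_eq_foldl_filter]
                    congr 1
                    simp
                  rw [hA]
                  have hcfA : pvCountFalse (((PySem.List.pyRange 0 nc 1).filter (pvEdge scc node)).foldl
                      (pvStep inc out scc nc f') (0, PySem.List.pySetD L node true)).2
                      ≤ pvCountFalse (PySem.List.pySetD L node true) := by
                    refine pvFoldl_cf_mono ?_ _ _
                    intro s i
                    exact pvARec_cf inc out scc nc f' i s.2
                  exact congrArg Prod.fst (pvFoldl_step_irr inc out scc nc rest _ f' (f'+1)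
                    (lt_of_le_of_lt hcfA (by omega)) (lt_of_le_of_lt hcfA (by omega)))

theorem pvTotal (start : Int) (inc out : List Int) (scc : List (List Bool)) (nc : Int)
    (labels : List Bool) :
    find_antibase start inc out scc nc labels = find_antibase_alt start inc out scc nc labels := by
  unfold find_antibase find_antibase_alt
  have hcf : pvCountFalse labels < labels.length + 1 := by
    unfold pvCountFalse
    have := List.count_le_length (a := false) (l := labels)
    omega
  rw [pvKey inc out scc nc ((nc.toNat + 1) * pvCountFalse labels + 1) labels [start] 0
      (labels.length + 1) le_rfl hcf]
  simp [pvStep]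

-- ===== VERDICT (by name: the statement is the Claim_ definition above) =====
theorem find_antibase_spec : Claim_equal_find_antibase := by
  intro start inc out scc nc labels _ _
  unfold Spec_find_antibase
  exact pvTotal start inc out scc nc labels
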